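-- pv_equiv track=rewrite | github.com/Opsimathy/IT5003 | Finals/CS2040S 25S1/CS2040S 25S1 Final Code.py | robotMovement
-- ===== SOURCE A (Python) =====
-- def robotMovement(C: str) -> bool:
--     x = y = 7
--     seen = {(x, y)}
--     for c in C:
--         if c == 'U':
--             y += 1
--         elif c == 'R':
--             x += 1
--         elif c == 'D':
--             y -= 1
--         elif c == 'L':
--             x -= 1
--         if (x, y) in seen:
--             return True
--         seen.add((x, y))
--     return False
-- ===== SOURCE B (Python) =====
-- def robotMovement(C: str) -> bool:
--     deltas = {'U': (0, 1), 'R': (1, 0), 'D': (0, -1), 'L': (-1, 0)}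
--     x, y = 7, 7
--     path = [(x, y)]
--     for c in C:
--         dx, dy = deltas.get(c, (0, 0))
--         x += dx
--         y += dy
--         path.append((x, y))
--     return len(set(path)) != len(path)
-- ===== Notes on version B (the rewrite author's own statement) =====
-- stated objective: alternative
-- what changed: Instead of an incremental seen-set membership check with early return, B materializes the whole path (via a delta table) and then decides revisit by comparing the distinct count of positions with the path length.
import Mathlib
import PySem

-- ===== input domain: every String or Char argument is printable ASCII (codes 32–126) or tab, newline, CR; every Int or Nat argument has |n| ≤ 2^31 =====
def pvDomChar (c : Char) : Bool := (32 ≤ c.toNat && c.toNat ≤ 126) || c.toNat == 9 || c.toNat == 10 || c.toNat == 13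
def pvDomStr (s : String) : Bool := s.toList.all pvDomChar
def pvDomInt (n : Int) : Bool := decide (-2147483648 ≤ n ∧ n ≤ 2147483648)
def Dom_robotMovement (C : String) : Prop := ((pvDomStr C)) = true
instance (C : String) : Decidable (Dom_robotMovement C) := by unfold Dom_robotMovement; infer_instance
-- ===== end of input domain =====

-- B replaces A's incremental seen-set check with early return by materializing the full path and comparing distinct count to length (alternative decomposition, not faster).

-- ===== PORT A =====
def pvStep (p : Int × Int) (c : Char) : Int × Int :=
  if c = 'U' then (p.1, p.2 + 1)
  else if c = 'R' then (p.1 + 1, p.2)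
  else if c = 'D' then (p.1, p.2 - 1)
  else if c = 'L' then (p.1 - 1, p.2)
  else p

def pvALoop : List Char → Int × Int → PySem.Set (Int × Int) → Bool
  | [], _, _ => false
  | c :: cs, p, seen =>
    let p' := pvStep p c
    if seen.contains p' then true
    else pvALoop cs p' (PySem.Set.add seen p')

def robotMovement (C : String) : Bool :=
  pvALoop C.toList (7, 7) (PySem.Set.ofList [((7 : Int), (7 : Int))])

-- ===== PORT B =====
def pvPath : List Char → Int × Int → List (Int × Int)
  | [], _ => []
  | c :: cs, p =>
    let p' := pvStep p c
    p' :: pvPath cs p'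

def robotMovement_alt (C : String) : Bool :=
  let path := ((7 : Int), (7 : Int)) :: pvPath C.toList (7, 7)
  decide ((PySem.Set.ofList path).length ≠ path.length)

-- ===== PRECONDITION & SPEC =====
def Spec_robotMovement (C : String) (out : Bool) : Prop := out = robotMovement_alt C
instance (C : String) (out : Bool) : Decidable (Spec_robotMovement C out) := by unfold Spec_robotMovement; infer_instance

-- ===== CLAIM (what is proved, stated in full; the proofs are below) =====
def Claim_equal_robotMovement : Prop := ∀ (C : String), Dom_robotMovement C → Spec_robotMovement C (robotMovement C)

-- ===== LEMMAS AND PROOFS =====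

theorem pv_len_add (s : PySem.Set (Int × Int)) (x : Int × Int) :
    (PySem.Set.add s x).length ≤ s.length + 1 := by
  unfold PySem.Set.add; split <;> simp

theorem pv_len_add_mem (s : PySem.Set (Int × Int)) (x : Int × Int)
    (h : s.contains x = true) : (PySem.Set.add s x).length = s.length := by
  unfold PySem.Set.add; simp [PySem.Set.contains] at h; simp [h]

theorem pv_len_add_not_mem (s : PySem.Set (Int × Int)) (x : Int × Int)
    (h : ¬ s.contains x = true) : (PySem.Set.add s x).length = s.length + 1 := by
  unfold PySem.Set.add; simp [PySem.Set.contains] at h; simp [h]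

theorem pv_len_update_le (l : List (Int × Int)) (s : PySem.Set (Int × Int)) :
    (PySem.Set.update s l).length ≤ s.length + l.length := by
  induction l generalizing s with
  | nil => simp [PySem.Set.update]
  | cons x xs ih =>
      have h1 := ih (PySem.Set.add s x)
      have h2 := pv_len_add s x
      simp only [PySem.Set.update, List.foldl_cons, List.length_cons] at *
      omega

-- main invariant: A's early-exit loop answers whether inserting the future path into
-- the seen set fails to grow it by the path's full length
theorem pv_loop_eq (cs : List Char) (p : Int × Int) (s : PySem.Set (Int × Int)) :
    pvALoop cs p s =
      decide ((PySem.Set.update s (pvPath cs p)).length ≠ s.length + (pvPath cs p).length) := by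
  induction cs generalizing p s with
  | nil => simp [pvALoop, pvPath, PySem.Set.update]
  | cons c cs ih =>
      simp only [pvALoop, pvPath]
      by_cases h : s.contains (pvStep p c) = true
      · have hadd := pv_len_add_mem s _ h
        have hle := pv_len_update_le (pvPath cs (pvStep p c)) (PySem.Set.add s (pvStep p c))
        simp only [h, if_pos, PySem.Set.update, List.foldl_cons, List.length_cons]
        rw [eq_comm, decide_eq_true_iff]
        simp only [PySem.Set.update] at hle
        omega
      · have hadd := pv_len_add_not_mem s _ h
        simp only [h, if_neg, Bool.false_eq_true, not_false_iff,
          PySem.Set.update, List.foldl_cons, List.length_cons]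
        rw [ih (pvStep p c) (PySem.Set.add s (pvStep p c))]
        simp only [PySem.Set.update]
        congr 1
        apply propext
        constructor <;> intro hx <;> omega

-- ===== VERDICT (by name: the statement is the Claim_ definition above) =====
theorem robotMovement_spec : Claim_equal_robotMovement := by
  intro C _
  unfold Spec_robotMovement robotMovement robotMovement_alt
  rw [pv_loop_eq]
  simp only [PySem.Set.ofList, PySem.Set.update, PySem.Set.empty, List.foldl_cons,
    List.foldl_nil, List.length_cons, decide_eq_decide]
  have : PySem.Set.add ([] : PySem.Set (Int × Int)) (7, 7) = [((7 : Int), (7 : Int))] := by decide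
  rw [this]
  simp only [List.length_singleton]
  omega
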